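-- pv_equiv track=rewrite | github.com/patty-chow/cs-313e | OfficeSpace.py | uncontested_space
-- ===== SOURCE A (Python) =====
-- def uncontested_space (bldg, rect):
--     cspace = 0
--     for y in range(rect[3]-rect[1]):
--         for x in range(rect[2]-rect[0]):
--             if y >= len(bldg):
--                 break
--             elif x >= len(bldg[0]):
--                 break
--             else:
--                 if bldg[y][x] == 1:
--                     cspace += 1
--
--     return cspace
-- ===== SOURCE B (Python) =====
-- def uncontested_space(bldg, rect):
--     # 2D prefix-sum (integral image) of 1-cells, then a single table lookup.
--     h = len(bldg)
--     w = len(bldg[0]) if bldg else 0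
--     P = [[0] * (w + 1)]
--     for row in bldg:
--         prev = P[-1]
--         cur = [0]
--         for j in range(w):
--             cur.append(cur[j] + prev[j + 1] - prev[j]
--                        + (1 if j < len(row) and row[j] == 1 else 0))
--         P.append(cur)
--     ymax = max(0, min(rect[3] - rect[1], h))
--     xmax = max(0, min(rect[2] - rect[0], w))
--     return P[ymax][xmax]
-- ===== Notes on version B (the rewrite author's own statement) =====
-- stated objective: alternative
-- what changed: Replaced the nested per-cell scan with breaks by building a 2D prefix-sum (integral image) table of 1-counts and answering with a single table lookup at the clamped bounds.
import Mathlib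
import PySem

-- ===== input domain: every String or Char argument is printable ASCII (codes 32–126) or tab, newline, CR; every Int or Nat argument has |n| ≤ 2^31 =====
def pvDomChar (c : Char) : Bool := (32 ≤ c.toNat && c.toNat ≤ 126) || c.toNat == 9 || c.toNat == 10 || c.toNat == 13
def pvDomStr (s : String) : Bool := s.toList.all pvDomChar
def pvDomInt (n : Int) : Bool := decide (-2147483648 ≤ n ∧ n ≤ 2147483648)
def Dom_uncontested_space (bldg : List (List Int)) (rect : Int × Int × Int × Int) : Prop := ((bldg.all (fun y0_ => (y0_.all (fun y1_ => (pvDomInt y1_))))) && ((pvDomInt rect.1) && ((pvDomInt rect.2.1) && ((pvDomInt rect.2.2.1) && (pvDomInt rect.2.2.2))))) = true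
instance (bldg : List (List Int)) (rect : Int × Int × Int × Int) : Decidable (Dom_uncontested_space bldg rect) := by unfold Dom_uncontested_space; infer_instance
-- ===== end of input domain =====

-- B replaces A's per-cell nested scan (with break-based bounding) by a 2D prefix-sum
-- (integral image) table built once, answered by a single table lookup; objective: alternative.

-- ===== PORT A =====
-- inner 'for x in range(...)' loop; a break returns the accumulator unchanged
def pvInnerA (bldg : List (List Int)) (y : Int) : List Int → Int → Int
  | [], acc => acc
  | x :: xs, acc =>
    if (bldg.length : Int) ≤ y then acc            -- y >= len(bldg): break
    else if ((PySem.List.pyGetD bldg 0 []).length : Int) ≤ x then acc  -- x >= len(bldg[0]): break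
    else if PySem.List.pyGetD (PySem.List.pyGetD bldg y []) x 0 = 1 then
      pvInnerA bldg y xs (acc + 1)
    else
      pvInnerA bldg y xs acc

def uncontested_space (bldg : List (List Int)) (rect : Int × Int × Int × Int) : Int :=
  (PySem.List.pyRange 0 (rect.2.2.2 - rect.2.1) 1).foldl
    (fun acc y => pvInnerA bldg y (PySem.List.pyRange 0 (rect.2.2.1 - rect.1) 1) acc) 0

-- ===== PORT B =====
-- body of the inner 'for j in range(w)' loop of Source B: cur.append(cur[j] + prev[j+1] - prev[j] + ind)
def pvCurStep (prev row : List Int) (cur : List Int) (j : Int) : List Int :=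
  cur ++ [PySem.List.pyGetD cur j 0 + PySem.List.pyGetD prev (j + 1) 0 - PySem.List.pyGetD prev j 0 +
    (if j < (row.length : Int) ∧ PySem.List.pyGetD row j 0 = 1 then 1 else 0)]

def uncontested_space_alt (bldg : List (List Int)) (rect : Int × Int × Int × Int) : Int :=
  let h := bldg.length
  let w := if bldg = [] then 0 else (PySem.List.pyGetD bldg 0 []).length
  -- P = [[0]*(w+1)]; for row in bldg: prev = P[-1]; build cur; P.append(cur)
  let P := bldg.foldl
    (fun P row =>
      P ++ [(PySem.List.pyRange 0 (w : Int) 1).foldl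
              (pvCurStep (PySem.List.pyGetD P (-1) []) row) [0]])
    [List.replicate (w + 1) 0]
  let ymax := max 0 (min (rect.2.2.2 - rect.2.1) (h : Int))
  let xmax := max 0 (min (rect.2.2.1 - rect.1) (w : Int))
  PySem.List.pyGetD (PySem.List.pyGetD P ymax []) xmax 0

-- ===== PRECONDITION & SPEC =====
-- Pre_ excludes exactly the inputs on which A raises IndexError: those where some scanned
-- row (index below both the y-bound and len(bldg)) is shorter than the scanned x-width
-- min(rect[2]-rect[0], len(bldg[0])); on every other input A returns normally.
def Pre_uncontested_space (bldg : List (List Int)) (rect : Int × Int × Int × Int) : Prop :=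
  ∀ i : Fin bldg.length, (i.1 : Int) < rect.2.2.2 - rect.2.1 →
    min (rect.2.2.1 - rect.1) (((bldg.headD []).length : Int)) ≤ (bldg[i].length : Int)
instance (bldg : List (List Int)) (rect : Int × Int × Int × Int) : Decidable (Pre_uncontested_space bldg rect) := by unfold Pre_uncontested_space; infer_instance

def pvWitness_uncontested_space : List (List Int) × (Int × Int × Int × Int) :=
  ([[1, 0], [0, 1]], (0, 0, 2, 2))

def Spec_uncontested_space (bldg : List (List Int)) (rect : Int × Int × Int × Int) (out : Int) : Prop := out = uncontested_space_alt bldg rect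
instance (bldg : List (List Int)) (rect : Int × Int × Int × Int) (out : Int) : Decidable (Spec_uncontested_space bldg rect out) := by unfold Spec_uncontested_space; infer_instance

-- ===== CLAIM (what is proved, stated in full; the proofs are below) =====
def Claim_equal_uncontested_space : Prop := ∀ (bldg : List (List Int)) (rect : Int × Int × Int × Int), Dom_uncontested_space bldg rect → Pre_uncontested_space bldg rect → Spec_uncontested_space bldg rect (uncontested_space bldg rect)

-- ===== LEMMAS AND PROOFS =====

-- count of 1-cells among the first j entries of a row
def pvRC (r : List Int) (j : Nat) : Int := ((r.take j).count 1 : Int)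

-- indexing a one-element extension: left part unchanged, new slot holds the new value
lemma pvGetD_concat_lt {α : Type} (xs : List α) (a d : α) (j : Nat) (hj : j < xs.length) :
    PySem.List.pyGetD (xs ++ [a]) (j : Int) d = PySem.List.pyGetD xs (j : Int) d := by
  rw [PySem.List.pyGetD_eq_getElem _ d (by omega) (by simp; omega),
      PySem.List.pyGetD_eq_getElem _ d (by omega) (by simpa using hj)]
  simp only [Int.toNat_natCast]
  rw [List.getElem_append_left hj]

lemma pvGetD_concat_self {α : Type} (xs : List α) (a d : α) :
    PySem.List.pyGetD (xs ++ [a]) ((xs.length : Nat) : Int) d = a := by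
  rw [PySem.List.pyGetD_eq_getElem _ d (by omega) (by simp)]
  simp

lemma pvRC_succ (row : List Int) (m : Nat) :
    pvRC row (m + 1) = pvRC row m +
      (if (m : Int) < (row.length : Int) ∧ PySem.List.pyGetD row (m : Int) 0 = 1 then 1 else 0) := by
  by_cases h : m < row.length
  · have hget : PySem.List.pyGetD row (m : Int) 0 = row[m] := by
      rw [PySem.List.pyGetD_eq_getElem _ 0 (by omega) (by simpa using h)]
      simp
    have htake : row.take (m + 1) = row.take m ++ [row[m]] := by
      rw [List.take_add_one]
      simp [List.getElem?_eq_getElem h]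
    simp only [pvRC, htake, List.count_append, List.count_singleton, hget]
    by_cases h1 : row[m] = 1
    · simp [h1, h]
    · simp [h1, h]
  · have htake : row.take (m + 1) = row.take m := by
      rw [List.take_of_length_le (by omega), List.take_of_length_le (by omega)]
    have : ¬ ((m : Int) < (row.length : Int)) := by omega
    simp [pvRC, htake, this]

-- the inner prefix loop of B: cur has length m+1 and cur[j] = prev[j] - prev[0] + pvRC row j
lemma pvCur_spec (prev row : List Int) (w : Nat) (_hp : prev.length = w + 1) :
    ∀ m : Nat, m ≤ w →
      ((PySem.List.pyRange 0 (m : Int) 1).foldl (pvCurStep prev row) [0]).length = m + 1 ∧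
      ∀ j : Nat, j ≤ m →
        PySem.List.pyGetD ((PySem.List.pyRange 0 (m : Int) 1).foldl (pvCurStep prev row) [0]) (j : Int) 0
          = PySem.List.pyGetD prev (j : Int) 0 - PySem.List.pyGetD prev 0 0 + pvRC row j := by
  intro m
  induction m with
  | zero =>
    intro _
    rw [show ((0 : Nat) : Int) = 0 from rfl, PySem.List.pyRange_one_eq_nil le_rfl]
    constructor
    · simp
    · intro j hj
      interval_cases j
      simp [pvRC, PySem.List.pyGetD_zero]
  | succ m ih =>
    intro hm
    obtain ⟨hlen, hval⟩ := ih (by omega)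
    have hsplit : PySem.List.pyRange 0 ((m + 1 : Nat) : Int) 1
        = PySem.List.pyRange 0 (m : Int) 1 ++ [(m : Int)] := by
      push_cast
      exact PySem.List.pyRange_one_succ_right (by omega)
    set cur := (PySem.List.pyRange 0 (m : Int) 1).foldl (pvCurStep prev row) [0] with hcur
    have hfold : (PySem.List.pyRange 0 ((m + 1 : Nat) : Int) 1).foldl (pvCurStep prev row) [0]
        = pvCurStep prev row cur (m : Int) := by
      rw [hsplit, List.foldl_append, List.foldl_cons, List.foldl_nil]
    rw [hfold]
    unfold pvCurStep
    constructor
    · simp [hlen]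
    · intro j hj
      by_cases hjm : j ≤ m
      · rw [show ((j : Nat) : Int) = ((j : Nat) : Int) from rfl,
            pvGetD_concat_lt cur _ 0 j (by omega)]
        exact hval j hjm
      · have hjeq : j = m + 1 := by omega
        subst hjeq
        set v := PySem.List.pyGetD cur (m : Int) 0 + PySem.List.pyGetD prev ((m : Int) + 1) 0 -
            PySem.List.pyGetD prev (m : Int) 0 +
            (if (m : Int) < (row.length : Int) ∧ PySem.List.pyGetD row (m : Int) 0 = 1 then 1 else 0) with hv
        have hcast : (((m + 1 : Nat)) : Int) = ((cur.length : Nat) : Int) := by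
          rw [hlen]
        have hself : PySem.List.pyGetD (cur ++ [v]) (((m + 1 : Nat)) : Int) 0 = v := by
          rw [hcast]; exact pvGetD_concat_self cur v 0
        rw [hself, hv, hval m le_rfl, pvRC_succ row m]
        push_cast
        ring

-- one step of B's outer loop preserves the table invariant; the whole fold gives
-- Q[y][x] = sum over the first y rows of pvRC row x
lemma pvBuild_spec (w : Nat) :
    ∀ (rs done P : List (List Int)),
      P.length = done.length + 1 →
      (∀ y : Nat, y < P.length → (PySem.List.pyGetD P (y : Int) []).length = w + 1) →
      (∀ y : Nat, y < P.length → ∀ x : Nat, x ≤ w →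
          PySem.List.pyGetD (PySem.List.pyGetD P (y : Int) []) (x : Int) 0
            = ((done.take y).map (fun r => pvRC r x)).sum) →
      (rs.foldl (fun P row =>
          P ++ [(PySem.List.pyRange 0 (w : Int) 1).foldl
                  (pvCurStep (PySem.List.pyGetD P (-1) []) row) [0]]) P).length
        = done.length + rs.length + 1 ∧
      (∀ y : Nat, y < done.length + rs.length + 1 → ∀ x : Nat, x ≤ w →
          PySem.List.pyGetD (PySem.List.pyGetD
            (rs.foldl (fun P row =>
              P ++ [(PySem.List.pyRange 0 (w : Int) 1).foldl
                      (pvCurStep (PySem.List.pyGetD P (-1) []) row) [0]]) P) (y : Int) [])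
            (x : Int) 0
            = (((done ++ rs).take y).map (fun r => pvRC r x)).sum) := by
  intro rs
  induction rs with
  | nil =>
    intro done P hlen hrl hrv
    refine ⟨by simpa using hlen, ?_⟩
    intro y hy x hx
    simp only [List.foldl_nil, List.append_nil]
    have hy' : y < P.length := by simp at hy; omega
    exact hrv y hy' x hx
  | cons row rs ih =>
    intro done P hlen hrl hrv
    have hPne : P ≠ [] := by intro h; rw [h] at hlen; simp at hlen
    have hprev : PySem.List.pyGetD P (-1) [] = PySem.List.pyGetD P ((done.length : Nat) : Int) [] := by
      rw [PySem.List.pyGetD_neg_one P [] hPne]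
      rw [PySem.List.pyGetD_eq_getElem _ [] (by omega) (by omega)]
      rw [List.getLast_eq_getElem]
      congr 1
      omega
    set prev := PySem.List.pyGetD P (-1) [] with hprevdef
    have hpl : prev.length = w + 1 := by
      rw [hprev]
      exact hrl done.length (by omega)
    have hpv : ∀ x : Nat, x ≤ w →
        PySem.List.pyGetD prev (x : Int) 0 = (done.map (fun r => pvRC r x)).sum := by
      intro x hx
      rw [hprev]
      rw [hrv done.length (by omega) x hx, List.take_of_length_le le_rfl]
    have hp0 : PySem.List.pyGetD prev 0 0 = 0 := by
      have := hpv 0 (by omega)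
      simp only [Nat.cast_zero] at this
      rw [this]
      simp [pvRC]
    set cur := (PySem.List.pyRange 0 (w : Int) 1).foldl (pvCurStep prev row) [0] with hcurdef
    obtain ⟨hclen, hcval⟩ := pvCur_spec prev row w hpl w le_rfl
    -- the new accumulator P ++ [cur] satisfies the invariant for done ++ [row]
    have hlen' : (P ++ [cur]).length = (done ++ [row]).length + 1 := by
      simp [hlen]
    have hrl' : ∀ y : Nat, y < (P ++ [cur]).length → (PySem.List.pyGetD (P ++ [cur]) (y : Int) []).length = w + 1 := by
      intro y hy
      by_cases hyP : y < P.length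
      · rw [pvGetD_concat_lt P cur [] y hyP]; exact hrl y hyP
      · have : y = P.length := by simp at hy; omega
        subst this
        rw [pvGetD_concat_self P cur []]
        exact hclen
    have hrv' : ∀ y : Nat, y < (P ++ [cur]).length → ∀ x : Nat, x ≤ w →
        PySem.List.pyGetD (PySem.List.pyGetD (P ++ [cur]) (y : Int) []) (x : Int) 0
          = (((done ++ [row]).take y).map (fun r => pvRC r x)).sum := by
      intro y hy x hx
      by_cases hyP : y < P.length
      · rw [pvGetD_concat_lt P cur [] y hyP, hrv y hyP x hx,
            List.take_append_of_le_length (by omega)]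
      · have : y = P.length := by simp at hy; omega
        subst this
        rw [pvGetD_concat_self P cur [], hcval x hx, hp0, hpv x hx]
        rw [List.take_of_length_le (by simp; omega)]
        simp
    have hih := ih (done ++ [row]) (P ++ [cur]) hlen' hrl' hrv'
    simp only [List.foldl_cons, List.length_append, List.length_cons, List.length_nil] at hih ⊢
    obtain ⟨h1, h2⟩ := hih
    refine ⟨by rw [h1]; omega, ?_⟩
    intro y hy x hx
    have h2' := h2 y (by omega) x hx
    simp only [List.append_assoc, List.singleton_append] at h2'
    exact h2'

-- closed form of B: sum over the clamped row prefix of per-row clamped 1-counts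
lemma pvAlt_eq (bldg : List (List Int)) (rect : Int × Int × Int × Int) :
    uncontested_space_alt bldg rect
      = ((bldg.take (max 0 (min (rect.2.2.2 - rect.2.1) (bldg.length : Int))).toNat).map
          (fun r => pvRC r (max 0 (min (rect.2.2.1 - rect.1)
            ((if bldg = [] then 0 else (PySem.List.pyGetD bldg 0 []).length : Nat) : Int))).toNat)).sum := by
  unfold uncontested_space_alt
  set w := (if bldg = [] then 0 else (PySem.List.pyGetD bldg 0 []).length : Nat) with hw
  have hinit1 : ([List.replicate (w + 1) (0 : Int)] : List (List Int)).length = ([] : List (List Int)).length + 1 := by simp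
  have hinit2 : ∀ y : Nat, y < ([List.replicate (w + 1) (0 : Int)] : List (List Int)).length →
      (PySem.List.pyGetD ([List.replicate (w + 1) (0 : Int)] : List (List Int)) (y : Int) []).length = w + 1 := by
    intro y hy
    simp at hy
    subst hy
    simp [PySem.List.pyGetD_zero]
  have hinit3 : ∀ y : Nat, y < ([List.replicate (w + 1) (0 : Int)] : List (List Int)).length →
      ∀ x : Nat, x ≤ w →
      PySem.List.pyGetD (PySem.List.pyGetD ([List.replicate (w + 1) (0 : Int)] : List (List Int)) (y : Int) []) (x : Int) 0
        = ((([] : List (List Int)).take y).map (fun r => pvRC r x)).sum := by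
    intro y hy x hx
    simp at hy
    subst hy
    simp [PySem.List.pyGetD_zero]
  obtain ⟨hql, hqv⟩ := pvBuild_spec w bldg [] [List.replicate (w + 1) 0] hinit1 hinit2 hinit3
  set ymax := max 0 (min (rect.2.2.2 - rect.2.1) (bldg.length : Int)) with hymax
  set xmax := max 0 (min (rect.2.2.1 - rect.1) (w : Int)) with hxmax
  have hycast : ymax = ((ymax.toNat : Nat) : Int) := by omega
  have hxcast : xmax = ((xmax.toNat : Nat) : Int) := by omega
  have hv := hqv ymax.toNat (by simp only [List.length_nil]; omega) xmax.toNat (by omega)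
  simp only [List.nil_append] at hv
  rw [← hycast, ← hxcast] at hv
  exact hv

-- ===== A-side lemmas (characterising the nested break-bounded scan) =====

-- once y has passed len(bldg) the inner loop breaks at once
lemma pvInnerA_of_ge (bldg : List (List Int)) (y : Int) (xs : List Int) (acc : Int)
    (h : (bldg.length : Int) ≤ y) : pvInnerA bldg y xs acc = acc := by
  cases xs <;> simp [pvInnerA, h]

-- the inner loop counts the 1-cells of row y up to min(xb, len(bldg[0]))
lemma pvInnerA_eq (bldg : List (List Int)) (y xb : Int)
    (hy : y < (bldg.length : Int))
    (hlen : min xb ((PySem.List.pyGetD bldg 0 []).length : Int)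
              ≤ ((PySem.List.pyGetD bldg y []).length : Int)) :
    ∀ (n : Nat) (x0 acc : Int), 0 ≤ x0 → (xb - x0).toNat ≤ n →
      pvInnerA bldg y (PySem.List.pyRange x0 xb 1) acc
        = acc + ((((PySem.List.pyGetD bldg y []).take
              (min xb ((PySem.List.pyGetD bldg 0 []).length : Int)).toNat).drop x0.toNat).count 1 : Int) := by
  set row := PySem.List.pyGetD bldg y [] with hrow
  set L0 := ((PySem.List.pyGetD bldg 0 []).length : Int) with hL0
  intro n
  induction n with
  | zero =>
    intro x0 acc hx0 hn
    have hbx : xb ≤ x0 := by omega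
    rw [PySem.List.pyRange_one_eq_nil hbx]
    have : (row.take (min xb L0).toNat).drop x0.toNat = [] := by
      rw [List.drop_eq_nil_iff]
      simp only [List.length_take]
      omega
    simp [pvInnerA, this]
  | succ n ih =>
    intro x0 acc hx0 hn
    by_cases hbx : xb ≤ x0
    · rw [PySem.List.pyRange_one_eq_nil hbx]
      have : (row.take (min xb L0).toNat).drop x0.toNat = [] := by
        rw [List.drop_eq_nil_iff]
        simp only [List.length_take]
        omega
      simp [pvInnerA, this]
    · have hx : x0 < xb := by omega
      rw [PySem.List.pyRange_one_cons hx]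
      have hynot : ¬ ((bldg.length : Int) ≤ y) := by omega
      by_cases hbreak : L0 ≤ x0
      · have : (row.take (min xb L0).toNat).drop x0.toNat = [] := by
          rw [List.drop_eq_nil_iff]
          simp only [List.length_take]
          omega
        simp [pvInnerA, hynot, ← hL0, hbreak, this]
      · -- x0 is inside the scanned width: one cell is inspected
        have hx0L : x0 < L0 := by omega
        have hx0row : x0.toNat < row.length := by omega
        have hxM : x0.toNat < (row.take (min xb L0).toNat).length := by
          simp only [List.length_take]; omega
        have hget : PySem.List.pyGetD row x0 0 = row[x0.toNat] :=
          PySem.List.pyGetD_eq_getElem row 0 hx0 (by omega)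
        have hdrop : (row.take (min xb L0).toNat).drop x0.toNat
            = row[x0.toNat] :: (row.take (min xb L0).toNat).drop (x0.toNat + 1) := by
          rw [List.drop_eq_getElem_cons hxM, List.getElem_take]
        have hsucc : (x0 + 1).toNat = x0.toNat + 1 := by omega
        have hrec : ∀ acc' : Int,
            pvInnerA bldg y (PySem.List.pyRange (x0 + 1) xb 1) acc'
              = acc' + (((row.take (min xb L0).toNat).drop (x0.toNat + 1)).count 1 : Int) := by
          intro acc'
          have := ih (x0 + 1) acc' (by omega) (by omega)
          rwa [hsucc] at this
        simp only [pvInnerA, hynot, ← hL0, hbreak, ← hrow, hget, if_false]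
        rw [hdrop, List.count_cons]
        by_cases hone : row[x0.toNat] = 1
        · have hbeq : (row[x0.toNat] == 1) = true := beq_iff_eq.mpr hone
          rw [if_pos hone, hrec, hbeq]
          push_cast
          simp only [if_true]
          omega
        · have hbeq : (row[x0.toNat] == 1) = false := by simpa using hone
          rw [if_neg hone, hrec, hbeq]
          push_cast
          omega

-- the outer loop sums the per-row counts over the scanned rows
lemma pvOuter_eq (bldg : List (List Int)) (yb xb : Int)
    (hpre : ∀ i : Fin bldg.length, (i.1 : Int) < yb →
      min xb (((bldg.headD []).length : Int)) ≤ (bldg[i].length : Int)) :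
    ∀ (n : Nat) (y0 acc : Int), 0 ≤ y0 → (yb - y0).toNat ≤ n →
      (PySem.List.pyRange y0 yb 1).foldl
          (fun acc y => pvInnerA bldg y (PySem.List.pyRange 0 xb 1) acc) acc
        = acc + (((bldg.take (min yb (bldg.length : Int)).toNat).drop y0.toNat).map
            (fun row => ((row.take (min xb ((PySem.List.pyGetD bldg 0 []).length : Int)).toNat).count 1 : Int))).sum := by
  intro n
  induction n with
  | zero =>
    intro y0 acc hy0 hn
    have hby : yb ≤ y0 := by omega
    rw [PySem.List.pyRange_one_eq_nil hby]
    have : (bldg.take (min yb (bldg.length : Int)).toNat).drop y0.toNat = [] := by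
      rw [List.drop_eq_nil_iff]
      simp only [List.length_take]
      omega
    simp [this]
  | succ n ih =>
    intro y0 acc hy0 hn
    by_cases hby : yb ≤ y0
    · rw [PySem.List.pyRange_one_eq_nil hby]
      have : (bldg.take (min yb (bldg.length : Int)).toNat).drop y0.toNat = [] := by
        rw [List.drop_eq_nil_iff]
        simp only [List.length_take]
        omega
      simp [this]
    · have hy : y0 < yb := by omega
      rw [PySem.List.pyRange_one_cons hy, List.foldl_cons]
      by_cases hge : (bldg.length : Int) ≤ y0
      · -- every remaining y is past the grid: nothing more is added
        rw [pvInnerA_of_ge bldg y0 _ acc hge]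
        have h1 : (bldg.take (min yb (bldg.length : Int)).toNat).drop y0.toNat = [] := by
          rw [List.drop_eq_nil_iff]; simp only [List.length_take]; omega
        have h2 : (bldg.take (min yb (bldg.length : Int)).toNat).drop (y0 + 1).toNat = [] := by
          rw [List.drop_eq_nil_iff]; simp only [List.length_take]; omega
        have := ih (y0 + 1) acc (by omega) (by omega)
        rw [this, h1, h2]
      · have hyl : y0 < (bldg.length : Int) := by omega
        have hy0n : y0.toNat < bldg.length := by omega
        have hgetrow : PySem.List.pyGetD bldg y0 [] = bldg[y0.toNat] :=
          PySem.List.pyGetD_eq_getElem bldg [] hy0 (by omega)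
        have hhead : bldg.headD [] = PySem.List.pyGetD bldg 0 [] := by
          rw [PySem.List.pyGetD_zero]; cases bldg <;> rfl
        have hlen : min xb ((PySem.List.pyGetD bldg 0 []).length : Int)
            ≤ ((PySem.List.pyGetD bldg y0 []).length : Int) := by
          have := hpre ⟨y0.toNat, hy0n⟩ (by simpa using (by omega : (y0.toNat : Int) < yb))
          rw [hhead] at this
          rw [hgetrow]
          simpa using this
        have hinner := pvInnerA_eq bldg y0 xb hyl hlen ((xb - 0).toNat) 0
          acc le_rfl le_rfl
        simp only [Int.toNat_zero, List.drop_zero] at hinner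
        rw [hinner]
        have hyM : y0.toNat < (bldg.take (min yb (bldg.length : Int)).toNat).length := by
          simp only [List.length_take]; omega
        have hdrop : (bldg.take (min yb (bldg.length : Int)).toNat).drop y0.toNat
            = bldg[y0.toNat] :: (bldg.take (min yb (bldg.length : Int)).toNat).drop (y0.toNat + 1) := by
          rw [List.drop_eq_getElem_cons hyM, List.getElem_take]
        have hsucc : (y0 + 1).toNat = y0.toNat + 1 := by omega
        have := ih (y0 + 1)
          (acc + (((PySem.List.pyGetD bldg y0 []).take
            (min xb ((PySem.List.pyGetD bldg 0 []).length : Int)).toNat).count 1 : Int))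
          (by omega) (by omega)
        rw [this, hsucc, hdrop]
        simp only [List.map_cons, List.sum_cons, hgetrow]
        ring

-- ===== VERDICT (by name: the statement is the Claim_ definition above) =====
theorem uncontested_space_spec : Claim_equal_uncontested_space := by
  intro bldg rect _hdom hpre
  simp only [Spec_uncontested_space, uncontested_space]
  set yb := rect.2.2.2 - rect.2.1 with hyb
  set xb := rect.2.2.1 - rect.1 with hxb
  have houter := pvOuter_eq bldg yb xb (by intro i hi; exact hpre i hi)
    (yb - 0).toNat 0 0 le_rfl le_rfl
  simp only [Int.toNat_zero, List.drop_zero, zero_add] at houter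
  rw [houter, pvAlt_eq]
  have hymax : (max 0 (min yb (bldg.length : Int))).toNat = (min yb (bldg.length : Int)).toNat := by
    omega
  rw [← hyb, ← hxb, hymax]
  by_cases hnil : bldg = []
  · subst hnil
    simp
  · rw [if_neg hnil]
    have hxmax : (max 0 (min xb ((PySem.List.pyGetD bldg 0 []).length : Int))).toNat
        = (min xb ((PySem.List.pyGetD bldg 0 []).length : Int)).toNat := by
      omega
    rw [hxmax]
    rfl
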